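-- pv_equiv track=rewrite | github.com/talavis/mdr_analysis | conservation.py | group_res_prop
-- ===== SOURCE A (Python) =====
-- def group_res_prop(sequences):
--     '''
--     Transform an alignment by grouping residues by their properties:
--     I - ILV
--     D - DE
--     K - KR
--     S - ST
--     N - NQ
--     Input: sequences - list of protein sequences
--     Return: the same alignment with the relevant residues replaced
--     by their group names
--     '''
--     for i in range(len(sequences)):
--         sequences[i] = sequences[i].replace('L', 'I')
--         sequences[i] = sequences[i].replace('V', 'I')
--         sequences[i] = sequences[i].replace('E', 'D')
--         sequences[i] = sequences[i].replace('R', 'K')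
--         sequences[i] = sequences[i].replace('Q', 'N')
--         sequences[i] = sequences[i].replace('T', 'S')
--     return sequences
-- ===== SOURCE B (Python) =====
-- def group_res_prop(sequences):
--     table = str.maketrans('LVERQT', 'IIDKNS')
--     for i in range(len(sequences)):
--         sequences[i] = sequences[i].translate(table)
--     return sequences
-- ===== Notes on version B (the rewrite author's own statement) =====
-- stated objective: idiomatic
-- what changed: Replaces six sequential whole-string replace() scans per sequence by one precomputed translation table applied in a single table-driven pass per string (str.maketrans/str.translate), keeping the in-place list mutation.
import Mathlib
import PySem

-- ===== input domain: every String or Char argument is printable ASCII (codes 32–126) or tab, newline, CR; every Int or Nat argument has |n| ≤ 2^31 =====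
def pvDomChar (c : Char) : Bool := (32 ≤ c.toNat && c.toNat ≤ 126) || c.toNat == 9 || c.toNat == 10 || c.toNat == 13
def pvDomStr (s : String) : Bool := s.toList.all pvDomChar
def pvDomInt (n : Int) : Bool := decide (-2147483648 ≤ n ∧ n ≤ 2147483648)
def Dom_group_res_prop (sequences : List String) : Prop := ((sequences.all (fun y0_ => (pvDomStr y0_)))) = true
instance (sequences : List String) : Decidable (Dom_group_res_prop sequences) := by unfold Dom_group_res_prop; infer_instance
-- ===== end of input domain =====

-- B builds one translation table and does a single table-driven pass per string instead of
-- A's six sequential replace() scans; both Pythons mutate the input list in place (equivalence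
-- here is about the returned list value).

-- ===== PORT A =====
def group_res_prop (sequences : List String) : List String :=
  sequences.map (fun s =>
    let s := PySem.Str.replace s "L" "I"
    let s := PySem.Str.replace s "V" "I"
    let s := PySem.Str.replace s "E" "D"
    let s := PySem.Str.replace s "R" "K"
    let s := PySem.Str.replace s "Q" "N"
    let s := PySem.Str.replace s "T" "S"
    s)

-- ===== PORT B =====
-- the translation table 'LVERQT' → 'IIDKNS' as a character function
def grpChar (c : Char) : Char :=
  if c = 'L' then 'I'
  else if c = 'V' then 'I'
  else if c = 'E' then 'D'
  else if c = 'R' then 'K'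
  else if c = 'Q' then 'N'
  else if c = 'T' then 'S'
  else c

def group_res_prop_alt (sequences : List String) : List String :=
  sequences.map (fun s => String.ofList (s.toList.map grpChar))

-- ===== PRECONDITION & SPEC =====
def Spec_group_res_prop (sequences : List String) (out : List String) : Prop := out = group_res_prop_alt sequences
instance (sequences : List String) (out : List String) : Decidable (Spec_group_res_prop sequences out) := by unfold Spec_group_res_prop; infer_instance

-- ===== CLAIM (what is proved, stated in full; the proofs are below) =====
def Claim_equal_group_res_prop : Prop := ∀ (sequences : List String), Dom_group_res_prop sequences → Spec_group_res_prop sequences (group_res_prop sequences)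

-- ===== LEMMAS AND PROOFS =====

-- single-character replace is a pointwise map (the 'go' loop with enough fuel)
theorem replace_go_single (a b : Char) :
    ∀ (fuel : Nat) (l acc : List Char), l.length ≤ fuel →
      PySem.Chars.replace.go [a] [b] fuel l acc
        = acc.reverse ++ l.map (fun c => if c = a then b else c) := by
  intro fuel
  induction fuel with
  | zero =>
      intro l acc h
      have : l = [] := List.eq_nil_of_length_eq_zero (Nat.le_zero.mp h)
      subst this
      simp [PySem.Chars.replace.go]
  | succ n ih =>
      intro l acc h
      cases l with
      | nil => simp [PySem.Chars.replace.go]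
      | cons c t =>
          by_cases hc : c = a
          · have hp : List.isPrefixOf [a] (c :: t) = true := by
              simp [List.isPrefixOf, hc]
            rw [PySem.Chars.replace.go, if_pos hp]
            have := ih t (b :: acc) (by simpa using Nat.lt_succ_iff.mp (by simpa using h))
            simp [hc, this]
          · have hp : List.isPrefixOf [a] (c :: t) = false := by
              simp [List.isPrefixOf]
              exact fun h => hc h.symm
            rw [PySem.Chars.replace.go, hp]
            have := ih t (c :: acc) (by simpa using Nat.lt_succ_iff.mp (by simpa using h))
            simp [hc, this]

theorem replace_single (a b : Char) (l : List Char) :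
    PySem.Chars.replace l [a] [b] = l.map (fun c => if c = a then b else c) := by
  simp [PySem.Chars.replace, replace_go_single a b l.length l [] le_rfl]

theorem grpChar_chain (c : Char) :
    (fun c => if c = 'T' then 'S' else c)
      ((fun c => if c = 'Q' then 'N' else c)
        ((fun c => if c = 'R' then 'K' else c)
          ((fun c => if c = 'E' then 'D' else c)
            ((fun c => if c = 'V' then 'I' else c)
              ((fun c => if c = 'L' then 'I' else c) c))))) = grpChar c := by
  unfold grpChar
  split_ifs <;> simp_all

theorem group_res_prop_string (s : String) :
    PySem.Str.replace (PySem.Str.replace (PySem.Str.replace (PySem.Str.replace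
      (PySem.Str.replace (PySem.Str.replace s "L" "I") "V" "I") "E" "D") "R" "K")
      "Q" "N") "T" "S" = String.ofList (s.toList.map grpChar) := by
  apply String.toList_injective
  rw [PySem.Str.toList_replace, PySem.Str.toList_replace, PySem.Str.toList_replace,
      PySem.Str.toList_replace, PySem.Str.toList_replace, PySem.Str.toList_replace]
  rw [show ("L" : String).toList = ['L'] from rfl, show ("I" : String).toList = ['I'] from rfl,
      show ("V" : String).toList = ['V'] from rfl, show ("E" : String).toList = ['E'] from rfl,
      show ("D" : String).toList = ['D'] from rfl, show ("R" : String).toList = ['R'] from rfl,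
      show ("K" : String).toList = ['K'] from rfl, show ("Q" : String).toList = ['Q'] from rfl,
      show ("N" : String).toList = ['N'] from rfl, show ("T" : String).toList = ['T'] from rfl,
      show ("S" : String).toList = ['S'] from rfl]
  rw [replace_single, replace_single, replace_single, replace_single, replace_single,
      replace_single]
  rw [String.toList_ofList]
  simp only [List.map_map, Function.comp_def]
  exact List.map_congr_left (fun c _ => grpChar_chain c)

-- ===== VERDICT (by name: the statement is the Claim_ definition above) =====
theorem group_res_prop_spec : Claim_equal_group_res_prop := by
  intro sequences _
  unfold Spec_group_res_prop group_res_prop group_res_prop_alt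
  exact List.map_congr_left (fun s _ => group_res_prop_string s)
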